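-- pv_equiv track=rewrite | github.com/surkoff-v/DocDif | pdf_text_diff.py | token_diff
-- ===== SOURCE A (Python) =====
-- from typing import List, Dict, Tuple
-- from difflib import SequenceMatcher
--
-- def token_diff(a: str, b: str) -> List[Tuple[str,str]]:
--     A, B = a.split(), b.split()
--     sm = SequenceMatcher(a=A, b=B, autojunk=False)
--     out: List[Tuple[str,str]] = []
--     for tag, i1, i2, j1, j2 in sm.get_opcodes():
--         if tag == "equal":
--             out.append(("eq"," ".join(A[i1:i2])))
--         elif tag == "delete":
--             out.append(("del"," ".join(A[i1:i2])))
--         elif tag == "insert":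
--             out.append(("ins"," ".join(B[j1:j2])))
--         elif tag == "replace":
--             if i1<i2: out.append(("del"," ".join(A[i1:i2])))
--             if j1<j2: out.append(("ins"," ".join(B[j1:j2])))
--     return out
-- ===== SOURCE B (Python) =====
-- from typing import List, Tuple
--
--
-- def _longest_run(A: List[str], B: List[str],
--                  alo: int, ahi: int, blo: int, bhi: int) -> Tuple[int, int, int]:
--     # textbook longest-common-substring DP over the window; the row-major
--     # scan with strict improvement keeps the earliest (i, j) among longest runs
--     best_i, best_j, best_n = alo, blo, 0
--     prev = [0] * (len(B) + 1)
--     for i in range(alo, ahi):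
--         cur = [0] * (len(B) + 1)
--         for j in range(blo, bhi):
--             if A[i] == B[j]:
--                 n = cur[j + 1] = prev[j] + 1
--                 if n > best_n:
--                     best_i, best_j, best_n = i - n + 1, j - n + 1, n
--         prev = cur
--     return best_i, best_j, best_n
--
--
-- def _diff(A: List[str], B: List[str],
--           alo: int, ahi: int, blo: int, bhi: int,
--           segs: List[Tuple[str, str]]) -> None:
--     # divide and conquer on the longest common run of words
--     i, j, n = _longest_run(A, B, alo, ahi, blo, bhi)
--     if n == 0:
--         if alo < ahi:
--             segs.append(("del", " ".join(A[alo:ahi])))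
--         if blo < bhi:
--             segs.append(("ins", " ".join(B[blo:bhi])))
--     else:
--         _diff(A, B, alo, i, blo, j, segs)
--         segs.append(("eq", " ".join(A[i:i + n])))
--         _diff(A, B, i + n, ahi, j + n, bhi, segs)
--
--
-- def token_diff(a: str, b: str) -> List[Tuple[str, str]]:
--     A, B = a.split(), b.split()
--     segs: List[Tuple[str, str]] = []
--     _diff(A, B, 0, len(A), 0, len(B), segs)
--     # coalesce touching segments of the same kind
--     out: List[Tuple[str, str]] = []
--     for tag, text in segs:
--         if out and out[-1][0] == tag:
--             out[-1] = (tag, out[-1][1] + " " + text)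
--         else:
--             out.append((tag, text))
--     return out
-- ===== Notes on version B (the rewrite author's own statement) =====
-- stated objective: alternative
-- what changed: B drops difflib entirely: the b2j hash index with the rolling j2len dict scan becomes a textbook longest-common-substring DP row table, the region queue + sort + block-merge + get_opcodes + four-way tag dispatch becomes a direct divide-and-conquer recursion that emits del/ins/eq segments in order followed by one same-tag coalescing pass.
import Mathlib
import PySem

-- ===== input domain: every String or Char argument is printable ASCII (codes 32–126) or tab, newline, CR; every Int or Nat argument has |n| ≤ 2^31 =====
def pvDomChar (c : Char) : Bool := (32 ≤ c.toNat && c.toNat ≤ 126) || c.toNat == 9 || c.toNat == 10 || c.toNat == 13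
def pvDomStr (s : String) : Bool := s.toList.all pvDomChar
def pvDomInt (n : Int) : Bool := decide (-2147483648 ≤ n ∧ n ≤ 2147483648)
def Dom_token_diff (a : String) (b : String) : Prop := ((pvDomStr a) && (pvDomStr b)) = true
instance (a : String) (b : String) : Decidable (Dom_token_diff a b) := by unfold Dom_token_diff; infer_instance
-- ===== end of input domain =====

-- B replaces the whole difflib pipeline (b2j index + j2len hash scan, queue of
-- regions + sort + block merge, get_opcodes + four-way tag dispatch) by a textbook
-- longest-common-substring DP table, a direct divide-and-conquer recursion that
-- emits segments in order, and one same-tag coalescing pass; same result, same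
-- asymptotic cost.

-- " ".join(X[u:v]) for natural slice bounds (both Pythons join slices of words)
def joinSlice (X : List String) (u v : Nat) : String :=
  PySem.Str.join " " (PySem.List.slice X (some (u : Int)) (some (v : Int)))

-- ===== PORT A =====
-- A calls difflib.SequenceMatcher (autojunk=False, no junk); the helpers below are
-- the transliteration of that library computation: b2j index, the j2len
-- longest-match scan (its junk-extension loops never fire with no junk), the
-- iterative region queue, sort, adjacent-block merge and the (la, lb, 0) sentinel.

-- b2j: word -> its indices in B, ascending (for j, w in enumerate(B): b2j.setdefault(w, []).append(j))
def mkB2j (B : List String) : PySem.Dict String (List Nat) :=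
  B.zipIdx.foldl
    (fun d p => PySem.Dict.insert d p.1 (PySem.Dict.getD d p.1 [] ++ [p.2]))
    PySem.Dict.empty

-- one row (fixed i) of find_longest_match's j2len scan.  j2len is a total function
-- Nat → Nat, default 0; at j = 0 Python looks up key -1, never present, hence the
-- `if j = 0 then 1` branch.  Python's `continue`/`break` window test on the
-- ascending index list is the filter.
def flmRow (A : List String) (b2j : PySem.Dict String (List Nat)) (blo bhi : Nat)
    (st : (Nat → Nat) × Nat × Nat × Nat) (i : Nat) : (Nat → Nat) × Nat × Nat × Nat :=
  ((PySem.Dict.getD b2j (A.getD i "") []).filter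
      (fun j => decide (blo ≤ j) && decide (j < bhi))).foldl
    (fun st2 j =>
      let k := if j = 0 then 1 else st.1 (j - 1) + 1
      ((fun x => if x = j then k else st2.1 x),
        if st2.2.2.2 < k then (i + 1 - k, j + 1 - k, k) else st2.2))
    ((fun _ => 0), st.2)

-- find_longest_match(alo, ahi, blo, bhi)
def flm (A : List String) (b2j : PySem.Dict String (List Nat))
    (alo ahi blo bhi : Nat) : Nat × Nat × Nat :=
  ((List.range' alo (ahi - alo)).foldl (flmRow A b2j blo bhi)
    ((fun _ => 0), alo, blo, 0)).2

-- the `while queue:` loop (head of the list is the top of the stack; Python pushes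
-- the left region, then the right, and pops the right first); fuel only makes the
-- loop structural — each popped region is replaced by strictly smaller ones, so at
-- most 1 + 2·|A| regions are ever popped and the fuel below is never exhausted
def stackBlocks (A : List String) (b2j : PySem.Dict String (List Nat)) :
    Nat → List (Nat × Nat × Nat × Nat) → List (Nat × Nat × Nat) → List (Nat × Nat × Nat)
  | 0, _, raw => raw
  | _ + 1, [], raw => raw
  | fuel + 1, (alo, ahi, blo, bhi) :: rest, raw =>
    let m := flm A b2j alo ahi blo bhi
    if 0 < m.2.2 then
      stackBlocks A b2j fuel
        ((m.1 + m.2.2, ahi, m.2.1 + m.2.2, bhi) :: (alo, m.1, blo, m.2.1) :: rest)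
        (raw ++ [m])
    else stackBlocks A b2j fuel rest raw

-- difflib's adjacent-block merge loop (state i1, j1, k1 starts at 0, 0, 0)
def mergeBlocks (i1 j1 k1 : Nat) : List (Nat × Nat × Nat) → List (Nat × Nat × Nat)
  | [] => if k1 ≠ 0 then [(i1, j1, k1)] else []
  | (i2, j2, k2) :: rest =>
    if i1 + k1 = i2 ∧ j1 + k1 = j2 then mergeBlocks i1 j1 (k1 + k2) rest
    else (if k1 ≠ 0 then [(i1, j1, k1)] else []) ++ mergeBlocks i2 j2 k2 rest

-- sm.get_matching_blocks(): raw.sort(key=t[0]) (the blocks occupy disjoint A-ranges),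
-- merge, sentinel
def matchingBlocks (A B : List String) : List (Nat × Nat × Nat) :=
  let d := mkB2j B
  let raw := stackBlocks A d (2 * (A.length + B.length) + 2) [(0, A.length, 0, B.length)] []
  mergeBlocks 0 0 0 (PySem.List.sorted raw (fun t => t.1) false) ++ [(A.length, B.length, 0)]

-- sm.get_opcodes(): tag each gap/match, threading (i, j)
def opcodesLoop (i j : Nat) : List (Nat × Nat × Nat) → List (String × Nat × Nat × Nat × Nat)
  | [] => []
  | (ai, bj, size) :: rest =>
    let tag : String :=
      if i < ai ∧ j < bj then "replace"
      else if i < ai then "delete"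
      else if j < bj then "insert" else ""
    (if tag ≠ "" then [(tag, i, ai, j, bj)] else [])
      ++ (if size ≠ 0 then [("equal", ai, ai + size, bj, bj + size)] else [])
      ++ opcodesLoop (ai + size) (bj + size) rest

def token_diff (a : String) (b : String) : List (String × String) :=
  let A := PySem.Str.split₀ a
  let B := PySem.Str.split₀ b
  (opcodesLoop 0 0 (matchingBlocks A B)).foldl
    (fun out op =>
      let tag := op.1
      let i1 := op.2.1; let i2 := op.2.2.1; let j1 := op.2.2.2.1; let j2 := op.2.2.2.2
      if tag = "equal" then out ++ [("eq", joinSlice A i1 i2)]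
      else if tag = "delete" then out ++ [("del", joinSlice A i1 i2)]
      else if tag = "insert" then out ++ [("ins", joinSlice B j1 j2)]
      else if tag = "replace" then
        let out2 := if i1 < i2 then out ++ [("del", joinSlice A i1 i2)] else out
        if j1 < j2 then out2 ++ [("ins", joinSlice B j1 j2)] else out2
      else out) []

-- ===== PORT B =====
-- one row of the longest-common-substring DP table (Source B's inner `for j` loop);
-- state is (previous row as a list, best_i, best_j, best_n)
def dpRow (A B : List String) (blo bhi : Nat)
    (st : List Nat × Nat × Nat × Nat) (i : Nat) : List Nat × Nat × Nat × Nat :=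
  (List.range' blo (bhi - blo)).foldl
    (fun st2 j =>
      if A.getD i "" == B.getD j "" then
        let n := st.1.getD j 0 + 1
        (st2.1.set (j + 1) n,
          if st2.2.2.2 < n then (i + 1 - n, j + 1 - n, n) else st2.2)
      else st2)
    (List.replicate (B.length + 1) 0, st.2)

-- _longest_run(A, B, alo, ahi, blo, bhi)
def dpRun (A B : List String) (alo ahi blo bhi : Nat) : Nat × Nat × Nat :=
  ((List.range' alo (ahi - alo)).foldl (dpRow A B blo bhi)
    (List.replicate (B.length + 1) 0, alo, blo, 0)).2

-- generic fold invariant (used by dp_bounds, which the ports' termination cites)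
lemma foldl_inv {α β : Type} (f : β → α → β) (P : β → Prop) :
    ∀ (l : List α) (b : β), P b → (∀ b x, x ∈ l → P b → P (f b x)) → P (l.foldl f b) := by
  intro l
  induction l with
  | nil => intro b hb _; exact hb
  | cons x xs ih =>
    intro b hb hstep
    exact ih (f b x) (hstep b x (List.mem_cons_self) hb)
      (fun b' y hy hb' => hstep b' y (List.mem_cons_of_mem _ hy) hb')

-- the returned run lies inside the window (cited by recDiff's termination proof)
lemma dp_bounds (A B : List String) (alo ahi blo bhi : Nat)
    (h : (dpRun A B alo ahi blo bhi).2.2 ≠ 0) :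
    alo ≤ (dpRun A B alo ahi blo bhi).1 ∧
    (dpRun A B alo ahi blo bhi).1 + (dpRun A B alo ahi blo bhi).2.2 ≤ ahi ∧
    blo ≤ (dpRun A B alo ahi blo bhi).2.1 ∧
    (dpRun A B alo ahi blo bhi).2.1 + (dpRun A B alo ahi blo bhi).2.2 ≤ bhi := by
  have main : ∀ nrows : Nat,
      (fun (st : List Nat × Nat × Nat × Nat) =>
        (∀ x, st.1.getD x 0 ≤ nrows ∧ st.1.getD x 0 ≤ x - blo) ∧
        (st.2.2.2 ≠ 0 → alo ≤ st.2.1 ∧ st.2.1 + st.2.2.2 ≤ alo + nrows ∧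
          blo ≤ st.2.2.1 ∧ st.2.2.1 + st.2.2.2 ≤ bhi))
      ((List.range' alo nrows).foldl (dpRow A B blo bhi)
        (List.replicate (B.length + 1) 0, alo, blo, 0)) := by
    intro nrows
    induction nrows with
    | zero =>
      simp only [List.range'_zero, List.foldl_nil]
      constructor
      · intro x
        constructor <;>
        · rcases lt_or_ge x (B.length + 1) with hx | hx
          · simp [List.getD_replicate _ hx]
          · have hz : (List.replicate (B.length + 1) (0:Nat)).getD x 0 = 0 :=
              List.getD_eq_default _ _ (by simp; omega)
            simp [hz]
      · intro hbn; simp at hbn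
    | succ nrows ih =>
      rw [List.range'_concat, List.foldl_append]
      simp only [one_mul, List.foldl_cons, List.foldl_nil]
      set st' := (List.range' alo nrows).foldl (dpRow A B blo bhi)
        (List.replicate (B.length + 1) 0, alo, blo, 0) with hst'
      set i := alo + nrows with hi
      unfold dpRow
      refine foldl_inv _ (fun (st2 : List Nat × Nat × Nat × Nat) =>
        (∀ x, st2.1.getD x 0 ≤ nrows + 1 ∧ st2.1.getD x 0 ≤ x - blo) ∧
        (st2.2.2.2 ≠ 0 → alo ≤ st2.2.1 ∧ st2.2.1 + st2.2.2.2 ≤ alo + (nrows + 1) ∧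
          blo ≤ st2.2.2.1 ∧ st2.2.2.1 + st2.2.2.2 ≤ bhi)) _ _ ?_ ?_
      · -- init
        constructor
        · intro x
          constructor <;>
          · rcases lt_or_ge x (B.length + 1) with hx | hx
            · simp [List.getD_replicate _ hx]
            · have hz : (List.replicate (B.length + 1) (0:Nat)).getD x 0 = 0 :=
                List.getD_eq_default _ _ (by simp; omega)
              simp [hz]
        · intro hbn
          dsimp only at hbn ⊢
          have := ih.2 hbn
          omega
      · -- step
        intro st2 j hj hQ
        have hjb : blo ≤ j ∧ j < bhi := by
          rw [List.mem_range'] at hj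
          obtain ⟨t, ht, rfl⟩ := hj
          omega
        by_cases heq : A.getD i "" == B.getD j ""
        · rw [if_pos heq]
          have hn1 : st'.1.getD j 0 ≤ nrows := (ih.1 j).1
          have hn2 : st'.1.getD j 0 ≤ j - blo := (ih.1 j).2
          constructor
          · intro x
            by_cases hx : x = j + 1
            · subst hx
              rcases lt_or_ge (j + 1) st2.1.length with hlen | hlen
              · have : (st2.1.set (j + 1) (st'.1.getD j 0 + 1)).getD (j + 1) 0
                    = st'.1.getD j 0 + 1 := by
                  simp [List.getD, List.getElem?_set, hlen]
                rw [this]; omega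
              · rw [List.getD_eq_default _ _ (by simp only [List.length_set]; omega)]
                omega
            · have : (st2.1.set (j + 1) (st'.1.getD j 0 + 1)).getD x 0 = st2.1.getD x 0 := by
                simp [List.getD, List.getElem?_set, Ne.symm hx]
              rw [this]
              exact hQ.1 x
          · dsimp only
            split
            · intro _
              dsimp only
              omega
            · exact hQ.2
        · rw [if_neg heq]; exact hQ
  by_cases hle : alo ≤ ahi
  · have := (main (ahi - alo)).2
    unfold dpRun at h ⊢
    have hr := this h
    omega
  · exfalso
    have h0 : ahi - alo = 0 := by omega
    unfold dpRun at h
    rw [h0] at h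
    simp at h

-- _diff: recurse left of the longest run, emit it, recurse right
def recDiff (A B : List String) (alo ahi blo bhi : Nat) : List (String × String) :=
  if h : (dpRun A B alo ahi blo bhi).2.2 = 0 then
    (if alo < ahi then [("del", joinSlice A alo ahi)] else [])
      ++ (if blo < bhi then [("ins", joinSlice B blo bhi)] else [])
  else
    have hb := dp_bounds A B alo ahi blo bhi h
    recDiff A B alo (dpRun A B alo ahi blo bhi).1 blo (dpRun A B alo ahi blo bhi).2.1
      ++ ("eq", joinSlice A (dpRun A B alo ahi blo bhi).1
            ((dpRun A B alo ahi blo bhi).1 + (dpRun A B alo ahi blo bhi).2.2))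
        :: recDiff A B ((dpRun A B alo ahi blo bhi).1 + (dpRun A B alo ahi blo bhi).2.2) ahi
            ((dpRun A B alo ahi blo bhi).2.1 + (dpRun A B alo ahi blo bhi).2.2) bhi
termination_by ahi - alo
decreasing_by all_goals omega

-- the final coalescing loop over segs (out[-1] inspection = getLast?)
def mergeSegs (segs : List (String × String)) : List (String × String) :=
  segs.foldl
    (fun out p =>
      match out.getLast? with
      | some q => if q.1 == p.1 then out.dropLast ++ [(p.1, q.2 ++ " " ++ p.2)] else out ++ [p]
      | none => out ++ [p])
    []

def token_diff_alt (a : String) (b : String) : List (String × String) :=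
  let A := PySem.Str.split₀ a
  let B := PySem.Str.split₀ b
  mergeSegs (recDiff A B 0 A.length 0 B.length)

-- ===== PRECONDITION & SPEC =====
def Spec_token_diff (a : String) (b : String) (out : List (String × String)) : Prop := out = token_diff_alt a b
instance (a : String) (b : String) (out : List (String × String)) : Decidable (Spec_token_diff a b out) := by unfold Spec_token_diff; infer_instance

-- ===== CLAIM =====
def Claim_equal_token_diff : Prop := ∀ (a : String) (b : String), Dom_token_diff a b → Spec_token_diff a b (token_diff a b)

-- ===== LEMMAS AND PROOFS =====

-- ---------- stage 1: A's opcode dispatch = gap/eq emission over the blocks ----------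

-- the cursor pass over matching blocks (proof-level common form of both sides)
def emitSegs (A B : List String) (pi pj : Nat) : List (Nat × Nat × Nat) → List (String × String)
  | [] => []
  | (i, j, n) :: rest =>
    (if pi < i then [("del", joinSlice A pi i)] else [])
      ++ (if pj < j then [("ins", joinSlice B pj j)] else [])
      ++ (if n ≠ 0 then [("eq", joinSlice A i (i + n))] else [])
      ++ emitSegs A B (i + n) (j + n) rest

-- what A's dispatch loop appends for one opcode
def dispatchOp (A B : List String) (op : String × Nat × Nat × Nat × Nat) : List (String × String) :=
  let tag := op.1
  let i1 := op.2.1; let i2 := op.2.2.1; let j1 := op.2.2.2.1; let j2 := op.2.2.2.2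
  if tag = "equal" then [("eq", joinSlice A i1 i2)]
  else if tag = "delete" then [("del", joinSlice A i1 i2)]
  else if tag = "insert" then [("ins", joinSlice B j1 j2)]
  else if tag = "replace" then
    (if i1 < i2 then [("del", joinSlice A i1 i2)] else [])
      ++ (if j1 < j2 then [("ins", joinSlice B j1 j2)] else [])
  else []

lemma foldl_dispatch (A B : List String) (ops : List (String × Nat × Nat × Nat × Nat))
    (acc : List (String × String)) :
    ops.foldl
      (fun out op =>
        let tag := op.1
        let i1 := op.2.1; let i2 := op.2.2.1; let j1 := op.2.2.2.1; let j2 := op.2.2.2.2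
        if tag = "equal" then out ++ [("eq", joinSlice A i1 i2)]
        else if tag = "delete" then out ++ [("del", joinSlice A i1 i2)]
        else if tag = "insert" then out ++ [("ins", joinSlice B j1 j2)]
        else if tag = "replace" then
          let out2 := if i1 < i2 then out ++ [("del", joinSlice A i1 i2)] else out
          if j1 < j2 then out2 ++ [("ins", joinSlice B j1 j2)] else out2
        else out) acc
    = acc ++ ops.flatMap (dispatchOp A B) := by
  have h : (fun (out : List (String × String)) op =>
      let tag := op.1
      let i1 := op.2.1; let i2 := op.2.2.1; let j1 := op.2.2.2.1; let j2 := op.2.2.2.2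
      if tag = "equal" then out ++ [("eq", joinSlice A i1 i2)]
      else if tag = "delete" then out ++ [("del", joinSlice A i1 i2)]
      else if tag = "insert" then out ++ [("ins", joinSlice B j1 j2)]
      else if tag = "replace" then
        let out2 := if i1 < i2 then out ++ [("del", joinSlice A i1 i2)] else out
        if j1 < j2 then out2 ++ [("ins", joinSlice B j1 j2)] else out2
      else out)
      = (fun out op => out ++ dispatchOp A B op) := by
    funext out op
    simp only [dispatchOp]
    split_ifs <;> simp
  rw [h, PySem.List.foldl_append_eq_flatMap]

lemma opcodes_emit (A B : List String) (bl : List (Nat × Nat × Nat)) :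
    ∀ i j, (opcodesLoop i j bl).flatMap (dispatchOp A B) = emitSegs A B i j bl := by
  induction bl with
  | nil => intro i j; simp [opcodesLoop, emitSegs]
  | cons hd rest ih =>
    intro i j
    obtain ⟨ai, bj, size⟩ := hd
    simp only [opcodesLoop, emitSegs, List.flatMap_append, ih]
    congr 1
    by_cases h1 : i < ai <;> by_cases h2 : j < bj <;>
      by_cases h3 : size = 0 <;>
      simp [h1, h2, h3, dispatchOp]

-- ---------- stage 2: difflib's j2len hash scan = the DP table ----------

lemma range_filter_window (blo bhi n : Nat) (h : bhi ≤ n) :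
    (List.range n).filter (fun j => decide (blo ≤ j) && decide (j < bhi))
      = List.range' blo (bhi - blo) := by
  have key : ∀ m : Nat, (List.range m).filter (fun j => decide (blo ≤ j) && decide (j < bhi))
      = List.range' blo (min bhi m - blo) := by
    intro m
    induction m with
    | zero => simp
    | succ m ih =>
      rw [List.range_succ, List.filter_append, ih]
      by_cases h1 : blo ≤ m ∧ m < bhi
      · have hstep : min bhi (m + 1) - blo = (min bhi m - blo) + 1 := by omega
        rw [hstep, List.range'_concat]
        have hf : List.filter (fun j => decide (blo ≤ j) && decide (j < bhi)) [m] = [m] := by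
          simp [h1.1, h1.2]
        rw [hf]
        have hm : blo + 1 * (min bhi m - blo) = m := by omega
        rw [hm]
      · have heq : min bhi (m + 1) - blo = min bhi m - blo := by omega
        rw [heq]
        simp only [List.filter_cons, List.filter_nil]
        rw [if_neg (by simp; omega)]
        simp
  rw [key n]; congr 1; omega

lemma zipIdx_filter_map (w : String) (B : List String) :
    (B.zipIdx.filter (fun p => p.1 == w)).map (·.2)
      = (List.range B.length).filter (fun j => B.getD j "" == w) := by
  induction B using List.reverseRecOn with
  | nil => simp
  | append_singleton B x ih =>
    rw [List.zipIdx_append, List.filter_append, List.map_append, List.length_append]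
    simp only [List.length_cons, List.length_nil]
    rw [show B.length + (0 + 1) = B.length + 1 from by omega, List.range_succ, List.filter_append]
    rw [ih]
    congr 1
    · apply List.filter_congr
      intro j hj
      simp only [List.mem_range] at hj
      rw [List.getD_append _ _ _ _ hj]
    · simp only [List.zipIdx, List.filter_cons]
      by_cases hx : x == w
      · rw [if_pos (by simpa using hx)]
        simp only [List.filter_cons, List.filter_nil]
        rw [if_pos (by simp [List.getD_append_right, hx])]
        simp
      · rw [if_neg (by simpa using hx)]
        simp only [List.filter_cons, List.filter_nil]
        rw [if_neg (by simp [List.getD_append_right]; simpa using hx)]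
        simp

lemma b2j_getD (B : List String) (w : String) :
    PySem.Dict.getD (mkB2j B) w []
      = (List.range B.length).filter (fun j => B.getD j "" == w) := by
  have hmod : mkB2j B = B.zipIdx.foldl
      (fun d p => PySem.Dict.modify d p.1 [] (· ++ [p.2])) PySem.Dict.empty := rfl
  rw [hmod, PySem.Dict.getD_foldl_modify_append, PySem.Dict.getD_empty]
  simp only [List.nil_append]
  exact zipIdx_filter_map w B

lemma foldl_rel {α β γ : Type} (f : β → α → β) (g : γ → α → γ) (R : β → γ → Prop) :
    ∀ (l : List α) (b : β) (c : γ), R b c →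
      (∀ b c x, x ∈ l → R b c → R (f b x) (g c x)) →
      R (l.foldl f b) (l.foldl g c) := by
  intro l
  induction l with
  | nil => intro b c hbc _; exact hbc
  | cons x xs ih =>
    intro b c hbc hstep
    exact ih (f b x) (g c x) (hstep b c x List.mem_cons_self hbc)
      (fun b' c' y hy h => hstep b' c' y (List.mem_cons_of_mem _ hy) h)

lemma getD_set_self (l : List Nat) (i v : Nat) (h : i < l.length) :
    (l.set i v).getD i 0 = v := by
  simp [List.getD, List.getElem?_set, h]

lemma getD_set_ne (l : List Nat) (i x v : Nat) (h : x ≠ i) :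
    (l.set i v).getD x 0 = l.getD x 0 := by
  simp [List.getD, List.getElem?_set, Ne.symm h]

def FDRel (B : List String) (st : (Nat → Nat) × Nat × Nat × Nat)
    (st' : List Nat × Nat × Nat × Nat) : Prop :=
  st.2 = st'.2 ∧ st'.1.length = B.length + 1 ∧ st'.1.getD 0 0 = 0 ∧
    ∀ x, st.1 x = st'.1.getD (x + 1) 0

lemma row_rel (A B : List String) (blo bhi : Nat) (hb : bhi ≤ B.length)
    (st : (Nat → Nat) × Nat × Nat × Nat) (st' : List Nat × Nat × Nat × Nat) (i : Nat)
    (hrel : FDRel B st st') :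
    FDRel B (flmRow A (mkB2j B) blo bhi st i) (dpRow A B blo bhi st' i) := by
  unfold flmRow dpRow
  rw [b2j_getD, List.filter_filter, List.foldl_filter]
  rw [← range_filter_window blo bhi B.length hb, List.foldl_filter]
  apply foldl_rel _ _ (FDRel B)
  · -- init
    refine ⟨hrel.1, by simp, by simp, ?_⟩
    intro x
    rcases lt_or_ge (x + 1) (B.length + 1) with hx | hx
    · simp [List.getD_replicate _ hx]
    · have hz : (List.replicate (B.length + 1) (0:Nat)).getD (x + 1) 0 = 0 :=
        List.getD_eq_default _ _ (by simp; omega)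
      simp [hz]
  · -- step
    intro b c j hj hR
    simp only [List.mem_range] at hj
    by_cases hwin : (decide (blo ≤ j) && decide (j < bhi)) = true
    · by_cases heq : (B.getD j "" == A.getD i "") = true
      · have heq' : (A.getD i "" == B.getD j "") = true := by
          rw [Bool.beq_comm]; exact heq
        rw [if_pos (by rw [hwin, heq]; rfl), if_pos hwin, if_pos heq']
        have hk : (if j = 0 then 1 else st.1 (j - 1) + 1) = st'.1.getD j 0 + 1 := by
          by_cases hj0 : j = 0
          · subst hj0
            rw [if_pos rfl, hrel.2.2.1]
          · rw [if_neg hj0, hrel.2.2.2 (j - 1), show j - 1 + 1 = j from by omega]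
        refine ⟨?_, ?_, ?_, ?_⟩
        · dsimp only
          rw [hk, hR.1]
        · simp [List.length_set, hR.2.1]
        · dsimp only
          rw [getD_set_ne _ _ _ _ (by omega)]
          exact hR.2.2.1
        · intro x
          dsimp only
          by_cases hx : x = j
          · subst hx
            rw [if_pos rfl, hk, getD_set_self _ _ _ (by rw [hR.2.1]; omega)]
          · rw [if_neg hx, getD_set_ne _ _ _ _ (by omega), hR.2.2.2 x]
      · have heq' : ¬ ((A.getD i "" == B.getD j "") = true) := by
          rw [Bool.beq_comm]; exact heq
        rw [if_neg (by simp only [Bool.and_eq_true]; tauto),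
            if_pos hwin, if_neg heq']
        exact hR
    · rw [if_neg (by simp only [Bool.and_eq_true] at hwin ⊢; tauto),
          if_neg hwin]
      exact hR

lemma flm_eq_dpRun (A B : List String) (alo ahi blo bhi : Nat) (hb : bhi ≤ B.length) :
    flm A (mkB2j B) alo ahi blo bhi = dpRun A B alo ahi blo bhi := by
  unfold flm dpRun
  have := foldl_rel (flmRow A (mkB2j B) blo bhi) (dpRow A B blo bhi) (FDRel B)
    (List.range' alo (ahi - alo)) ((fun _ => 0), alo, blo, 0)
    (List.replicate (B.length + 1) 0, alo, blo, 0)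
    (by
      refine ⟨rfl, by simp, by simp, ?_⟩
      intro x
      rcases lt_or_ge (x + 1) (B.length + 1) with hx | hx
      · simp [List.getD_replicate _ hx]
      · have hz : (List.replicate (B.length + 1) (0:Nat)).getD (x + 1) 0 = 0 :=
          List.getD_eq_default _ _ (by simp; omega)
        simp [hz])
    (fun b c x _ h => row_rel A B blo bhi hb b c x h)
  exact this.1

-- ---------- stage 3: queue + sort = in-order recursion ----------

-- ghost: the matching blocks in left-to-right order
def inBlocks (A B : List String) (alo ahi blo bhi : Nat) : List (Nat × Nat × Nat) :=
  if h : (dpRun A B alo ahi blo bhi).2.2 = 0 then []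
  else
    have hb := dp_bounds A B alo ahi blo bhi h
    inBlocks A B alo (dpRun A B alo ahi blo bhi).1 blo (dpRun A B alo ahi blo bhi).2.1
      ++ dpRun A B alo ahi blo bhi
        :: inBlocks A B ((dpRun A B alo ahi blo bhi).1 + (dpRun A B alo ahi blo bhi).2.2) ahi
            ((dpRun A B alo ahi blo bhi).2.1 + (dpRun A B alo ahi blo bhi).2.2) bhi
termination_by ahi - alo
decreasing_by all_goals omega

-- ghost: how many regions the queue loop pops for this window
def pops (A B : List String) (alo ahi blo bhi : Nat) : Nat :=
  if h : (dpRun A B alo ahi blo bhi).2.2 = 0 then 1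
  else
    have hb := dp_bounds A B alo ahi blo bhi h
    1 + pops A B alo (dpRun A B alo ahi blo bhi).1 blo (dpRun A B alo ahi blo bhi).2.1
      + pops A B ((dpRun A B alo ahi blo bhi).1 + (dpRun A B alo ahi blo bhi).2.2) ahi
          ((dpRun A B alo ahi blo bhi).2.1 + (dpRun A B alo ahi blo bhi).2.2) bhi
termination_by ahi - alo
decreasing_by all_goals omega

lemma pops_pos (A B : List String) (alo ahi blo bhi : Nat) :
    1 ≤ pops A B alo ahi blo bhi := by
  rw [pops]; split
  · omega
  · show 1 ≤ 1 + pops A B _ _ _ _ + pops A B _ _ _ _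
    omega

lemma pops_le (A B : List String) :
    ∀ (N alo ahi blo bhi : Nat), ahi - alo ≤ N →
      pops A B alo ahi blo bhi ≤ 2 * (ahi - alo) + 1 := by
  intro N
  induction N with
  | zero =>
    intro alo ahi blo bhi hN
    rw [pops]
    split
    · omega
    · rename_i h0
      have hb := dp_bounds A B alo ahi blo bhi h0
      exfalso
      omega
  | succ N ih =>
    intro alo ahi blo bhi hN
    rw [pops]
    split
    · omega
    · rename_i h0
      have hb := dp_bounds A B alo ahi blo bhi h0
      show 1 + pops A B alo (dpRun A B alo ahi blo bhi).1 blo (dpRun A B alo ahi blo bhi).2.1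
        + pops A B ((dpRun A B alo ahi blo bhi).1 + (dpRun A B alo ahi blo bhi).2.2) ahi
            ((dpRun A B alo ahi blo bhi).2.1 + (dpRun A B alo ahi blo bhi).2.2) bhi
        ≤ 2 * (ahi - alo) + 1
      have h1 := ih alo (dpRun A B alo ahi blo bhi).1 blo (dpRun A B alo ahi blo bhi).2.1
        (by omega)
      have h2 := ih ((dpRun A B alo ahi blo bhi).1 + (dpRun A B alo ahi blo bhi).2.2) ahi
        ((dpRun A B alo ahi blo bhi).2.1 + (dpRun A B alo ahi blo bhi).2.2) bhi (by omega)
      omega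

lemma stack_perm (A B : List String) :
    ∀ (fuel : Nat) (regions : List (Nat × Nat × Nat × Nat)) (raw : List (Nat × Nat × Nat)),
      (∀ r ∈ regions, r.2.2.2 ≤ B.length) →
      (regions.map (fun r => pops A B r.1 r.2.1 r.2.2.1 r.2.2.2)).sum ≤ fuel →
      (stackBlocks A (mkB2j B) fuel regions raw).Perm
        (raw ++ regions.flatMap (fun r => inBlocks A B r.1 r.2.1 r.2.2.1 r.2.2.2)) := by
  intro fuel
  induction fuel with
  | zero =>
    intro regions raw hwf hsum
    cases regions with
    | nil => simp [stackBlocks]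
    | cons r rest =>
      exfalso
      have h1 := pops_pos A B r.1 r.2.1 r.2.2.1 r.2.2.2
      simp only [List.map_cons, List.sum_cons] at hsum
      omega
  | succ fuel ih =>
    intro regions raw hwf hsum
    cases regions with
    | nil => simp [stackBlocks]
    | cons r rest =>
      obtain ⟨alo, ahi, blo, bhi⟩ := r
      have hwfh : bhi ≤ B.length := hwf _ List.mem_cons_self
      have hwft : ∀ r ∈ rest, r.2.2.2 ≤ B.length :=
        fun r hr => hwf r (List.mem_cons_of_mem _ hr)
      have hfd := flm_eq_dpRun A B alo ahi blo bhi hwfh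
      simp only [List.map_cons, List.sum_cons] at hsum
      show (stackBlocks A (mkB2j B) (fuel + 1) ((alo, ahi, blo, bhi) :: rest) raw).Perm _
      simp only [stackBlocks, hfd]
      by_cases h0 : (dpRun A B alo ahi blo bhi).2.2 = 0
      · rw [if_neg (by omega)]
        have hp : pops A B alo ahi blo bhi = 1 := by rw [pops, dif_pos h0]
        have hib : inBlocks A B alo ahi blo bhi = [] := by rw [inBlocks, dif_pos h0]
        have := ih rest raw hwft (by omega)
        simp only [List.flatMap_cons]
        rw [hib, List.nil_append]
        exact this
      · rw [if_pos (by omega)]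
        have hb := dp_bounds A B alo ahi blo bhi h0
        have hp : pops A B alo ahi blo bhi
            = 1 + pops A B alo (dpRun A B alo ahi blo bhi).1 blo (dpRun A B alo ahi blo bhi).2.1
              + pops A B ((dpRun A B alo ahi blo bhi).1 + (dpRun A B alo ahi blo bhi).2.2) ahi
                  ((dpRun A B alo ahi blo bhi).2.1 + (dpRun A B alo ahi blo bhi).2.2) bhi := by
          rw [pops, dif_neg h0]
        have hib : inBlocks A B alo ahi blo bhi
            = inBlocks A B alo (dpRun A B alo ahi blo bhi).1 blo (dpRun A B alo ahi blo bhi).2.1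
              ++ dpRun A B alo ahi blo bhi
                :: inBlocks A B ((dpRun A B alo ahi blo bhi).1 + (dpRun A B alo ahi blo bhi).2.2) ahi
                    ((dpRun A B alo ahi blo bhi).2.1 + (dpRun A B alo ahi blo bhi).2.2) bhi := by
          rw [inBlocks, dif_neg h0]
        rcases hm : dpRun A B alo ahi blo bhi with ⟨mi, mj, mk⟩
        rw [hm] at hb hp hib
        dsimp only at hb hp hib ⊢
        have hwf' : ∀ r ∈ ((mi + mk, ahi, mj + mk, bhi) :: (alo, mi, blo, mj) :: rest),
            r.2.2.2 ≤ B.length := by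
          intro r hr
          simp only [List.mem_cons] at hr
          rcases hr with rfl | rfl | hr
          · exact hwfh
          · show mj ≤ B.length
            omega
          · exact hwft r hr
        have hsum' : (((mi + mk, ahi, mj + mk, bhi) :: (alo, mi, blo, mj) :: rest).map
            (fun r => pops A B r.1 r.2.1 r.2.2.1 r.2.2.2)).sum ≤ fuel := by
          simp only [List.map_cons, List.sum_cons]
          show pops A B (mi + mk) ahi (mj + mk) bhi
            + (pops A B alo mi blo mj
              + (rest.map (fun r => pops A B r.1 r.2.1 r.2.2.1 r.2.2.2)).sum) ≤ fuel
          omega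
        have ihres := ih ((mi + mk, ahi, mj + mk, bhi) :: (alo, mi, blo, mj) :: rest)
          (raw ++ [(mi, mj, mk)]) hwf' hsum'
        refine ihres.trans ?_
        simp only [List.flatMap_cons]
        rw [hib]
        simp only [List.append_assoc, List.singleton_append]
        apply List.Perm.append_left
        have p1 : (inBlocks A B (mi + mk) ahi (mj + mk) bhi
              ++ (inBlocks A B alo mi blo mj
                ++ rest.flatMap (fun r => inBlocks A B r.1 r.2.1 r.2.2.1 r.2.2.2))).Perm
            (inBlocks A B alo mi blo mj
              ++ (inBlocks A B (mi + mk) ahi (mj + mk) bhi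
                ++ rest.flatMap (fun r => inBlocks A B r.1 r.2.1 r.2.2.1 r.2.2.2))) := by
          rw [← List.append_assoc, ← List.append_assoc]
          exact (List.perm_append_comm).append_right _
        exact (p1.cons (mi, mj, mk)).trans List.perm_middle.symm

-- chained blocks: starts past (p, q), strictly advancing, ends within (pe, qe)
def ChainB (p q pe qe : Nat) : List (Nat × Nat × Nat) → Prop
  | [] => p ≤ pe ∧ q ≤ qe
  | (i, j, k) :: rest => p ≤ i ∧ q ≤ j ∧ 1 ≤ k ∧ ChainB (i + k) (j + k) pe qe rest

lemma ChainB_nil (p q pe qe : Nat) : ChainB p q pe qe [] ↔ (p ≤ pe ∧ q ≤ qe) := Iff.rfl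

lemma ChainB_cons (p q pe qe i j k : Nat) (rest : List (Nat × Nat × Nat)) :
    ChainB p q pe qe ((i, j, k) :: rest)
      ↔ (p ≤ i ∧ q ≤ j ∧ 1 ≤ k ∧ ChainB (i + k) (j + k) pe qe rest) := Iff.rfl

lemma chain_weaken (pe qe : Nat) :
    ∀ (bs : List (Nat × Nat × Nat)) (p q p' q' : Nat), p ≤ p' → q ≤ q' →
      ChainB p' q' pe qe bs → ChainB p q pe qe bs := by
  intro bs p q p' q' h1 h2 h
  cases bs with
  | nil => exact ⟨le_trans h1 h.1, le_trans h2 h.2⟩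
  | cons b rest =>
    obtain ⟨i, j, k⟩ := b
    exact ⟨le_trans h1 h.1, le_trans h2 h.2.1, h.2.2⟩

lemma chain_glue (pe qe : Nat) :
    ∀ (xs ys : List (Nat × Nat × Nat)) (p q m1 m2 : Nat),
      ChainB p q m1 m2 xs → ChainB m1 m2 pe qe ys → ChainB p q pe qe (xs ++ ys) := by
  intro xs
  induction xs with
  | nil =>
    intro ys p q m1 m2 hx hy
    exact chain_weaken pe qe ys p q m1 m2 hx.1 hx.2 hy
  | cons b rest ih =>
    intro ys p q m1 m2 hx hy
    obtain ⟨i, j, k⟩ := b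
    exact ⟨hx.1, hx.2.1, hx.2.2.1, ih ys (i + k) (j + k) m1 m2 hx.2.2.2 hy⟩

lemma chain_mem_lb (pe qe : Nat) :
    ∀ (bs : List (Nat × Nat × Nat)) (p q : Nat), ChainB p q pe qe bs →
      ∀ b ∈ bs, p ≤ b.1 ∧ q ≤ b.2.1 := by
  intro bs
  induction bs with
  | nil => intro p q _ b hb; cases hb
  | cons hd rest ih =>
    intro p q h b hb
    obtain ⟨i, j, k⟩ := hd
    rw [ChainB_cons] at h
    simp only [List.mem_cons] at hb
    rcases hb with rfl | hb
    · exact ⟨h.1, h.2.1⟩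
    · have := ih (i + k) (j + k) h.2.2.2 b hb
      omega

lemma chain_start_le (pe qe : Nat) :
    ∀ (bs : List (Nat × Nat × Nat)) (p q : Nat), ChainB p q pe qe bs →
      p ≤ pe ∧ q ≤ qe := by
  intro bs
  induction bs with
  | nil => intro p q h; exact h
  | cons hd rest ih =>
    intro p q h
    obtain ⟨i, j, k⟩ := hd
    rw [ChainB_cons] at h
    have := ih (i + k) (j + k) h.2.2.2
    have h1 := h.1
    have h2 := h.2.1
    omega

lemma inBlocks_chain (A B : List String) :
    ∀ (N alo ahi blo bhi : Nat), ahi - alo ≤ N → alo ≤ ahi → blo ≤ bhi →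
      ChainB alo blo ahi bhi (inBlocks A B alo ahi blo bhi) := by
  intro N
  induction N with
  | zero =>
    intro alo ahi blo bhi hN h1 h2
    rw [inBlocks]
    split
    · exact (ChainB_nil alo blo ahi bhi).mpr ⟨h1, h2⟩
    · rename_i h0
      have hb := dp_bounds A B alo ahi blo bhi h0
      exfalso
      omega
  | succ N ih =>
    intro alo ahi blo bhi hN h1 h2
    rw [inBlocks]
    split
    · exact (ChainB_nil alo blo ahi bhi).mpr ⟨h1, h2⟩
    · rename_i h0
      have hb := dp_bounds A B alo ahi blo bhi h0
      show ChainB alo blo ahi bhi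
        (inBlocks A B alo (dpRun A B alo ahi blo bhi).1 blo (dpRun A B alo ahi blo bhi).2.1
          ++ dpRun A B alo ahi blo bhi
            :: inBlocks A B ((dpRun A B alo ahi blo bhi).1 + (dpRun A B alo ahi blo bhi).2.2) ahi
                ((dpRun A B alo ahi blo bhi).2.1 + (dpRun A B alo ahi blo bhi).2.2) bhi)
      have hL := ih alo (dpRun A B alo ahi blo bhi).1 blo (dpRun A B alo ahi blo bhi).2.1
        (by omega) (by omega) (by omega)
      have hR := ih ((dpRun A B alo ahi blo bhi).1 + (dpRun A B alo ahi blo bhi).2.2) ahi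
        ((dpRun A B alo ahi blo bhi).2.1 + (dpRun A B alo ahi blo bhi).2.2) bhi
        (by omega) (by omega) (by omega)
      apply chain_glue ahi bhi _ _ alo blo (dpRun A B alo ahi blo bhi).1
        (dpRun A B alo ahi blo bhi).2.1 hL
      rcases hm : dpRun A B alo ahi blo bhi with ⟨mi, mj, mk⟩
      rw [hm] at hb hR h0
      dsimp only at h0 hR hb ⊢
      refine (ChainB_cons mi mj ahi bhi mi mj mk _).mpr ⟨le_refl mi, le_refl mj, ?_, hR⟩
      omega

lemma chain_pairwise (pe qe : Nat) :
    ∀ (bs : List (Nat × Nat × Nat)) (p q : Nat), ChainB p q pe qe bs →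
      bs.Pairwise (fun x y => x.1 < y.1) := by
  intro bs
  induction bs with
  | nil => intro _ _ _; exact List.Pairwise.nil
  | cons hd rest ih =>
    intro p q h
    obtain ⟨i, j, k⟩ := hd
    rw [ChainB_cons] at h
    refine List.Pairwise.cons ?_ (ih (i + k) (j + k) h.2.2.2)
    intro y hy
    have := chain_mem_lb pe qe rest (i + k) (j + k) h.2.2.2 y hy
    have hk := h.2.2.1
    simp only []
    omega

lemma matchingBlocks_eq (A B : List String) :
    matchingBlocks A B
      = mergeBlocks 0 0 0 (inBlocks A B 0 A.length 0 B.length)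
          ++ [(A.length, B.length, 0)] := by
  have hperm := stack_perm A B (2 * (A.length + B.length) + 2)
    [(0, A.length, 0, B.length)] []
    (by
      intro r hr
      simp only [List.mem_singleton] at hr
      subst hr
      exact le_refl _)
    (by
      simp only [List.map_cons, List.map_nil, List.sum_cons, List.sum_nil]
      have := pops_le A B A.length 0 A.length 0 B.length (by omega)
      omega)
  simp only [List.flatMap_cons, List.flatMap_nil, List.append_nil, List.nil_append] at hperm
  have hchain := inBlocks_chain A B A.length 0 A.length 0 B.length (by omega) (by omega) (by omega)
  have hpw := chain_pairwise A.length B.length _ 0 0 hchain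
  have hsorted := PySem.List.sorted_eq_of_perm_of_pairwise_lt
    (stackBlocks A (mkB2j B) (2 * (A.length + B.length) + 2) [(0, A.length, 0, B.length)] [])
    (inBlocks A B 0 A.length 0 B.length) (fun t => t.1) hperm.symm hpw
  show mergeBlocks 0 0 0
      (PySem.List.sorted
        (stackBlocks A (mkB2j B) (2 * (A.length + B.length) + 2) [(0, A.length, 0, B.length)] [])
        (fun t => t.1) false)
      ++ [(A.length, B.length, 0)] = _
  rw [hsorted]

-- ---------- stage 4: emission over in-order blocks = the recursion ----------

lemma emitSegs_nil (A B : List String) (p q : Nat) : emitSegs A B p q [] = [] := rfl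

lemma emitSegs_cons (A B : List String) (p q i j n : Nat) (rest : List (Nat × Nat × Nat)) :
    emitSegs A B p q ((i, j, n) :: rest)
      = (if p < i then [("del", joinSlice A p i)] else [])
          ++ (if q < j then [("ins", joinSlice B q j)] else [])
          ++ (if n ≠ 0 then [("eq", joinSlice A i (i + n))] else [])
          ++ emitSegs A B (i + n) (j + n) rest := rfl

set_option maxRecDepth 4000 in
lemma emitSegs_split (A B : List String) :
    ∀ (xs : List (Nat × Nat × Nat)) (p q i j n : Nat) (ys : List (Nat × Nat × Nat)),
      emitSegs A B p q (xs ++ (i, j, n) :: ys)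
        = emitSegs A B p q (xs ++ [(i, j, 0)])
          ++ (if n ≠ 0 then [("eq", joinSlice A i (i + n))] else [])
          ++ emitSegs A B (i + n) (j + n) ys := by
  intro xs
  induction xs with
  | nil =>
    intro p q i j n ys
    simp only [List.nil_append]
    rw [emitSegs_cons, emitSegs_cons, emitSegs_nil]
    simp
  | cons hd rest ih =>
    intro p q i j n ys
    obtain ⟨a, b, c⟩ := hd
    simp only [List.cons_append, emitSegs_cons]
    rw [ih]
    simp only [List.append_assoc]

lemma emit_rec (A B : List String) :
    ∀ (N alo ahi blo bhi : Nat), ahi - alo ≤ N →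
      emitSegs A B alo blo (inBlocks A B alo ahi blo bhi ++ [(ahi, bhi, 0)])
        = recDiff A B alo ahi blo bhi := by
  intro N
  induction N with
  | zero =>
    intro alo ahi blo bhi hN
    rw [inBlocks, recDiff]
    split
    · rw [List.nil_append, emitSegs_cons, emitSegs_nil]
      simp
    · rename_i h0
      have hb := dp_bounds A B alo ahi blo bhi h0
      exfalso
      omega
  | succ N ih =>
    intro alo ahi blo bhi hN
    rw [inBlocks, recDiff]
    split
    · rw [List.nil_append, emitSegs_cons, emitSegs_nil]
      simp
    · rename_i h0
      have hb := dp_bounds A B alo ahi blo bhi h0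
      show emitSegs A B alo blo
          ((inBlocks A B alo (dpRun A B alo ahi blo bhi).1 blo (dpRun A B alo ahi blo bhi).2.1
            ++ dpRun A B alo ahi blo bhi
              :: inBlocks A B ((dpRun A B alo ahi blo bhi).1 + (dpRun A B alo ahi blo bhi).2.2) ahi
                  ((dpRun A B alo ahi blo bhi).2.1 + (dpRun A B alo ahi blo bhi).2.2) bhi)
            ++ [(ahi, bhi, 0)]) = _
      rcases hm : dpRun A B alo ahi blo bhi with ⟨mi, mj, mk⟩
      rw [hm] at hb h0
      dsimp only at h0 hb ⊢
      rw [List.append_assoc, List.cons_append, emitSegs_split]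
      
      rw [ih alo mi blo mj (by omega), ih (mi + mk) ahi (mj + mk) bhi (by omega)]
      rw [if_pos (by omega : mk ≠ 0)]
      simp

-- ---------- stage 5: block merge = segment merge ----------

-- clean recursive form of the coalescing loop
def mergeAux : (String × String) → List (String × String) → List (String × String)
  | p, [] => [p]
  | p, s :: rest =>
    if p.1 == s.1 then mergeAux (s.1, p.2 ++ " " ++ s.2) rest else p :: mergeAux s rest

lemma mergeSegs_aux (rest : List (String × String)) :
    ∀ (done : List (String × String)) (p : String × String),
      rest.foldl
        (fun out p =>
          match out.getLast? with
          | some q => if q.1 == p.1 then out.dropLast ++ [(p.1, q.2 ++ " " ++ p.2)] else out ++ [p]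
          | none => out ++ [p])
        (done ++ [p])
      = done ++ mergeAux p rest := by
  induction rest with
  | nil => intro done p; simp [mergeAux]
  | cons s rest ih =>
    intro done p
    simp only [List.foldl_cons, List.getLast?_concat]
    by_cases h : p.1 == s.1
    · rw [if_pos h, List.dropLast_concat, ih done (s.1, p.2 ++ " " ++ s.2)]
      simp [mergeAux, h]
    · rw [if_neg h]
      have : done ++ [p] ++ [s] = (done ++ [p]) ++ [s] := by simp
      rw [this, ih (done ++ [p]) s]
      simp [mergeAux, h]

lemma mergeSegs_eq_mergeAux (segs : List (String × String)) :
    mergeSegs segs = match segs with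
      | [] => []
      | s :: rest => mergeAux s rest := by
  cases segs with
  | nil => rfl
  | cons s rest =>
    show rest.foldl _ ([] ++ [s]) = _
    exact (mergeSegs_aux rest [] s).trans (by simp)

lemma strjoin_append (l1 l2 : List String) (h1 : l1 ≠ []) (h2 : l2 ≠ []) :
    PySem.Str.join " " (l1 ++ l2) = PySem.Str.join " " l1 ++ " " ++ PySem.Str.join " " l2 := by
  have interc : ∀ (sep : List Char) (xs ys : List (List Char)), xs ≠ [] → ys ≠ [] →
      sep.intercalate (xs ++ ys) = sep.intercalate xs ++ sep ++ sep.intercalate ys := by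
    intro sep xs ys hx hy
    have hc : ∀ (a b : List Char) (l : List (List Char)),
        sep.intercalate (a :: b :: l) = a ++ sep ++ sep.intercalate (b :: l) := by
      intro a b l; simp [List.intercalate, List.intersperse]
    obtain ⟨x, xs', rfl⟩ := List.exists_cons_of_ne_nil hx
    obtain ⟨y, ys', rfl⟩ := List.exists_cons_of_ne_nil hy
    clear hx hy
    induction xs' generalizing x with
    | nil =>
      simpa [List.intercalate, List.intersperse] using hc x y ys'
    | cons x2 xs'' ih =>
      have hshape : (x :: x2 :: xs'') ++ y :: ys' = x :: x2 :: (xs'' ++ y :: ys') := by simp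
      rw [hshape]
      have h2 : x2 :: (xs'' ++ y :: ys') = (x2 :: xs'') ++ y :: ys' := by simp
      rw [hc, h2, ih x2, hc x x2]
      simp
  unfold PySem.Str.join PySem.Chars.join
  rw [List.map_append, interc _ _ _ (by simpa using h1) (by simpa using h2)]
  simp only [String.ofList_append]
  have hsp : ∀ K : List Char, String.ofList (' ' :: K) = " " ++ String.ofList K := by
    intro K
    rw [show (' ' :: K) = [' '] ++ K from rfl, String.ofList_append]
  simp [hsp, String.append_assoc]

lemma joinSlice_split (X : List String) (u v w : Nat)
    (h1 : u < v) (h2 : v < w) (h3 : w ≤ X.length) :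
    joinSlice X u w = joinSlice X u v ++ " " ++ joinSlice X v w := by
  unfold joinSlice
  rw [PySem.List.slice_natCast, PySem.List.slice_natCast, PySem.List.slice_natCast]
  have hsplit : (X.drop u).take (w - u) = (X.drop u).take (v - u) ++ (X.drop v).take (w - v) := by
    have : w - u = (v - u) + (w - v) := by omega
    rw [this, List.take_add]
    congr 2
    rw [List.drop_drop]
    congr 1
    omega
  rw [hsplit]
  apply strjoin_append
  · have : ((X.drop u).take (v - u)).length = v - u := by
      rw [List.length_take, List.length_drop]; omega
    intro hnil; rw [hnil] at this; simp at this; omega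
  · have : ((X.drop v).take (w - v)).length = w - v := by
      rw [List.length_take, List.length_drop]; omega
    intro hnil; rw [hnil] at this; simp at this; omega

-- the del/ins gap between the cursor and the next block
def gapSegs (A B : List String) (p q i j : Nat) : List (String × String) :=
  (if p < i then [("del", joinSlice A p i)] else [])
    ++ (if q < j then [("ins", joinSlice B q j)] else [])

lemma mergeAux_nil (p : String × String) : mergeAux p [] = [p] := rfl

lemma mergeAux_cons (p s : String × String) (rest : List (String × String)) :
    mergeAux p (s :: rest)
      = if p.1 == s.1 then mergeAux (s.1, p.2 ++ " " ++ s.2) rest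
        else p :: mergeAux s rest := rfl

lemma merge_emit (A B : List String) :
    ∀ (bs : List (Nat × Nat × Nat)) (i1 j1 k1 pi pj : Nat),
      ChainB (i1 + k1) (j1 + k1) A.length B.length bs →
      1 ≤ k1 → pi ≤ i1 → pj ≤ j1 → i1 + k1 ≤ A.length → j1 + k1 ≤ B.length →
      emitSegs A B pi pj (mergeBlocks i1 j1 k1 bs ++ [(A.length, B.length, 0)])
        = gapSegs A B pi pj i1 j1
          ++ mergeAux ("eq", joinSlice A i1 (i1 + k1))
              (emitSegs A B (i1 + k1) (j1 + k1) (bs ++ [(A.length, B.length, 0)])) := by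
  intro bs
  induction bs with
  | nil =>
    intro i1 j1 k1 pi pj hch hk1 hpi hpj hia hjb
    have hmb : mergeBlocks i1 j1 k1 [] = [(i1, j1, k1)] := by
      simp only [mergeBlocks]
      rw [if_pos (by omega)]
    rw [hmb]
    simp only [List.cons_append, List.nil_append]
    rw [emitSegs_cons, emitSegs_cons, emitSegs_nil]
    rw [if_pos (by omega : k1 ≠ 0)]
    simp only [gapSegs, List.append_nil]
    by_cases hda : i1 + k1 < A.length <;> by_cases hdb : j1 + k1 < B.length <;>
      simp [hda, hdb, mergeAux_cons, mergeAux_nil, List.append_assoc]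
  | cons hd bs' ih =>
    intro i1 j1 k1 pi pj hch hk1 hpi hpj hia hjb
    obtain ⟨i2, j2, k2⟩ := hd
    rw [ChainB_cons] at hch
    obtain ⟨h12, hj12, hk2, hch'⟩ := hch
    have hub := chain_start_le A.length B.length bs' (i2 + k2) (j2 + k2) hch'
    by_cases hadj : i1 + k1 = i2 ∧ j1 + k1 = j2
    · have hmb : mergeBlocks i1 j1 k1 ((i2, j2, k2) :: bs')
          = mergeBlocks i1 j1 (k1 + k2) bs' := by
        simp only [mergeBlocks]
        rw [if_pos hadj]
      rw [hmb]
      have hch'' : ChainB (i1 + (k1 + k2)) (j1 + (k1 + k2)) A.length B.length bs' := by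
        rw [show i1 + (k1 + k2) = i2 + k2 from by omega,
            show j1 + (k1 + k2) = j2 + k2 from by omega]
        exact hch'
      rw [ih i1 j1 (k1 + k2) pi pj hch'' (by omega) hpi hpj (by omega) (by omega)]
      congr 1
      rw [List.cons_append, emitSegs_cons]
      rw [if_neg (by omega), if_neg (by omega), if_pos (by omega : k2 ≠ 0)]
      simp only [List.nil_append, List.singleton_append]
      rw [mergeAux_cons, if_pos (by rfl)]
      have hjoin : joinSlice A i1 (i1 + (k1 + k2))
          = joinSlice A i1 (i1 + k1) ++ " " ++ joinSlice A i2 (i2 + k2) := by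
        rw [show i1 + (k1 + k2) = i2 + k2 from by omega]
        rw [joinSlice_split A i1 (i1 + k1) (i2 + k2) (by omega) (by omega) (by omega)]
        rw [hadj.1]
      rw [hjoin]
      rw [show i1 + (k1 + k2) = i2 + k2 from by omega,
          show j1 + (k1 + k2) = j2 + k2 from by omega]
    · have hmb : mergeBlocks i1 j1 k1 ((i2, j2, k2) :: bs')
          = (i1, j1, k1) :: mergeBlocks i2 j2 k2 bs' := by
        simp only [mergeBlocks]
        rw [if_neg hadj, if_pos (by omega)]
        rfl
      rw [hmb, List.cons_append, emitSegs_cons, if_pos (by omega : k1 ≠ 0)]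
      rw [ih i2 j2 k2 (i1 + k1) (j1 + k1) hch' (by omega) (by omega) (by omega)
          (by omega) (by omega)]
      rw [List.cons_append, emitSegs_cons]
      rw [if_pos (by omega : k2 ≠ 0)]
      -- the gap between the pending block and (i2, j2, k2) is nonempty
      simp only [gapSegs]
      rcases Nat.lt_or_ge (i1 + k1) i2 with hda | hda
      · by_cases hdb : j1 + k1 < j2 <;>
          simp [hda, hdb, mergeAux_cons, mergeAux_nil, List.append_assoc]
      · have hda' : ¬ (i1 + k1 < i2) := by omega
        have hdb : j1 + k1 < j2 := by omega
        simp [hda', hdb, mergeAux_cons, mergeAux_nil, List.append_assoc]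

lemma mergeBlocks_zero (i j k : Nat) (bs : List (Nat × Nat × Nat)) :
    mergeBlocks 0 0 0 ((i, j, k) :: bs) = mergeBlocks i j k bs := by
  show (if 0 + 0 = i ∧ 0 + 0 = j then mergeBlocks 0 0 (0 + k) bs
    else (if (0:Nat) ≠ 0 then [(0, 0, 0)] else []) ++ mergeBlocks i j k bs) = _
  split
  · rename_i hc
    obtain ⟨h1, h2⟩ := hc
    simp [← h1, ← h2]
  · simp

lemma mergeSegs_cons (s : String × String) (rest : List (String × String)) :
    mergeSegs (s :: rest) = mergeAux s rest := mergeSegs_eq_mergeAux (s :: rest)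

lemma final_main (A B : List String) :
    emitSegs A B 0 0 (matchingBlocks A B)
      = mergeSegs (recDiff A B 0 A.length 0 B.length) := by
  rw [matchingBlocks_eq,
      ← emit_rec A B A.length 0 A.length 0 B.length (by omega)]
  have hchain := inBlocks_chain A B A.length 0 A.length 0 B.length (by omega) (by omega) (by omega)
  cases hbs : inBlocks A B 0 A.length 0 B.length with
  | nil =>
    have hmb : mergeBlocks 0 0 0 ([] : List (Nat × Nat × Nat)) = [] := by
      simp [mergeBlocks]
    rw [hmb]
    simp only [List.nil_append]
    rw [emitSegs_cons, emitSegs_nil]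
    by_cases hla : 0 < A.length <;> by_cases hlb : 0 < B.length <;>
      simp [hla, hlb, mergeSegs_cons, mergeAux_cons, mergeAux_nil,
        mergeSegs, List.append_assoc]
  | cons blk bs' =>
    obtain ⟨i, j, k⟩ := blk
    rw [hbs] at hchain
    rw [ChainB_cons] at hchain
    obtain ⟨-, -, hk, hch'⟩ := hchain
    have hub := chain_start_le A.length B.length bs' (i + k) (j + k) hch'
    rw [mergeBlocks_zero]
    rw [merge_emit A B bs' i j k 0 0 hch' hk (Nat.zero_le i) (Nat.zero_le j) hub.1 hub.2]
    rw [List.cons_append, emitSegs_cons, if_pos (by omega : k ≠ 0)]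
    simp only [gapSegs]
    by_cases hla : 0 < i <;> by_cases hlb : 0 < j <;>
      simp [hla, hlb, mergeSegs_cons, mergeAux_cons, mergeAux_nil, List.append_assoc]

-- ===== VERDICT =====
theorem token_diff_spec : Claim_equal_token_diff := by
  intro a b _
  show token_diff a b = token_diff_alt a b
  unfold token_diff token_diff_alt
  rw [foldl_dispatch, opcodes_emit]
  simp only [List.nil_append]
  exact final_main _ _
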